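-- pv_equiv track=rewrite | github.com/mauromaigret-ui/Censo-2024-localidades-Tablas | backend/app/services/grouping.py | group_columns
-- ===== SOURCE A (Python) =====
-- from typing import Dict, List
--
-- def _tokenize(name: str) -> List[str]:
--     return [t for t in name.split("_") if t]
--
-- def group_columns(columns: List[str]) -> Dict[str, List[str]]:
--     tokens_map = {col: _tokenize(col) for col in columns}
--     prefix_counts: Dict[str, int] = {}
--
--     for col, tokens in tokens_map.items():
--         if len(tokens) < 3:
--             continue
--         for length in range(2, len(tokens)):
--             prefix = "_".join(tokens[:length])
--             prefix_counts[prefix] = prefix_counts.get(prefix, 0) + 1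
--
--     groups: Dict[str, List[str]] = {}
--     for col, tokens in tokens_map.items():
--         best_prefix = None
--         if len(tokens) >= 3:
--             for length in range(2, len(tokens)):
--                 prefix = "_".join(tokens[:length])
--                 if prefix_counts.get(prefix, 0) >= 2:
--                     best_prefix = prefix
--             if best_prefix:
--                 groups.setdefault(best_prefix, []).append(col)
--                 continue
--         groups.setdefault(col, []).append(col)
--
--     return groups
-- ===== SOURCE B (Python) =====
-- from typing import Dict, List
--
--
-- def _tokenize(name: str) -> List[str]:
--     return [t for t in name.split("_") if t]
--
--
-- def group_columns(columns: List[str]) -> Dict[str, List[str]]: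
--     # Work on token lists directly: no prefix-count dictionary is built.
--     # For each unique column, scan candidate prefix lengths from longest to
--     # shortest and take the first one shared (strictly extended) by >= 2
--     # unique columns.
--     uniq = list(dict.fromkeys(columns))
--     toks = [_tokenize(c) for c in uniq]
--     groups: Dict[str, List[str]] = {}
--     for c, t in zip(uniq, toks):
--         key = c
--         for k in range(len(t) - 1, 1, -1):
--             if sum(1 for u in toks if len(u) > k and u[:k] == t[:k]) >= 2:
--                 key = "_".join(t[:k])
--                 break
--         groups.setdefault(key, []).append(c)
--     return groups
-- ===== Notes on version B (the rewrite author's own statement) =====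
-- stated objective: alternative
-- what changed: B drops A's two-pass prefix-count dictionary entirely: it deduplicates the columns once, then for each column scans candidate prefix lengths from longest to shortest and picks the first token-prefix strictly extended by at least two unique columns by comparing token lists pairwise, so no joined-prefix strings or counters are ever built for rejected candidates.
import Mathlib
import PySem

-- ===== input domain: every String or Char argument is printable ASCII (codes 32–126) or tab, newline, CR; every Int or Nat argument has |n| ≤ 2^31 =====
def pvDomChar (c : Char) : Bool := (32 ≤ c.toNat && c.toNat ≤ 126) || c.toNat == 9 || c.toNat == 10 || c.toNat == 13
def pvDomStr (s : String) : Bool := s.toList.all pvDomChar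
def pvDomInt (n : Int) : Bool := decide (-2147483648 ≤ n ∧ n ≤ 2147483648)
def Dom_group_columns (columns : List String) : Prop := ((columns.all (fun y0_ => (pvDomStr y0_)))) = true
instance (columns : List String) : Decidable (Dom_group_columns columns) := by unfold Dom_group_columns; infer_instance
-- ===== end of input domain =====

-- B replaces A's two-pass joined-prefix counter dictionary by a per-column longest-first scan that
-- counts sharers by direct pairwise token-list comparison (objective: alternative, same results).

-- ===== PORT A =====
-- _tokenize, shared verbatim by both Pythons
def pyTokenize (name : String) : List String :=
  ((PySem.Str.split? name "_").getD []).filter (fun t => t != "")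

def group_columns (columns : List String) : List (String × List String) :=
  let tokensMap : PySem.Dict String (List String) :=
    columns.foldl (fun d col => d.insert col (pyTokenize col)) PySem.Dict.empty
  let prefixCounts : PySem.Dict String Int :=
    tokensMap.items.foldl (fun pc ct =>
      if (ct.2.length : Int) < 3 then pc
      else (PySem.List.pyRange 2 (ct.2.length : Int) 1).foldl (fun pc len =>
        let pfx := PySem.Str.join "_" (PySem.List.slice ct.2 none (some len))
        pc.modify pfx 0 (· + 1)) pc) PySem.Dict.empty
  let groups : PySem.Dict String (List String) :=
    tokensMap.items.foldl (fun g ct =>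
      let bestPrefix : Option String :=
        if 3 ≤ (ct.2.length : Int) then
          (PySem.List.pyRange 2 (ct.2.length : Int) 1).foldl (fun best len =>
            let pfx := PySem.Str.join "_" (PySem.List.slice ct.2 none (some len))
            if 2 ≤ prefixCounts.getD pfx 0 then some pfx else best) none
        else none
      match bestPrefix with
      | some p => if p != "" then g.modify p [] (· ++ [ct.1]) else g.modify ct.1 [] (· ++ [ct.1])
      | none => g.modify ct.1 [] (· ++ [ct.1])) PySem.Dict.empty
  groups.items

-- ===== PORT B =====
-- the inner `for k in range(len(t)-1, 1, -1): … break` loop of Source B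
def bestKeyB_go (toks : List (List String)) (c : String) (t : List String) : List Int → String
  | [] => c
  | k :: ks =>
      -- `u[:k]`/`t[:k]` with k ≥ 2 from the range: take k.toNat is exact here
      if 2 ≤ toks.countP (fun u => decide (k < (u.length : Int) ∧ u.take k.toNat = t.take k.toNat))
      then PySem.Str.join "_" (t.take k.toNat) else bestKeyB_go toks c t ks

def group_columns_alt (columns : List String) : List (String × List String) :=
  let uniq : List String := PySem.List.dedup columns
  let toks : List (List String) := uniq.map pyTokenize
  let groups : PySem.Dict String (List String) :=
    (uniq.zip toks).foldl (fun g ct =>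
      g.modify (bestKeyB_go toks ct.1 ct.2 (PySem.List.pyRange ((ct.2.length : Int) - 1) 1 (-1))) [] (· ++ [ct.1]))
      PySem.Dict.empty
  groups.items

-- ===== PRECONDITION & SPEC =====
def Spec_group_columns (columns : List String) (out : List (String × List String)) : Prop := out = group_columns_alt columns
instance (columns : List String) (out : List (String × List String)) : Decidable (Spec_group_columns columns out) := by unfold Spec_group_columns; infer_instance

-- ===== CLAIM (what is proved, stated in full; the proofs are below) =====
def Claim_equal_group_columns : Prop := ∀ (columns : List String), Dom_group_columns columns → Spec_group_columns columns (group_columns columns)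

-- ===== LEMMAS AND PROOFS =====

-- proof-side names for the pieces of both programs
def pfxOf (t : List String) (len : Int) : String := PySem.Str.join "_" (t.take len.toNat)

def prefixListOf (t : List String) : List String :=
  (PySem.List.pyRange 2 (t.length : Int) 1).map (pfxOf t)

def pcOf (columns : List String) : PySem.Dict String Int :=
  ((PySem.List.dedup columns).flatMap (fun c => prefixListOf (pyTokenize c))).foldl
    (fun pc p => pc.modify p 0 (· + 1)) PySem.Dict.empty

def GoodTok (s : String) : Prop := s ≠ "" ∧ '_' ∉ s.toList

-- every piece split("_") produces is free of '_'
lemma go_free : ∀ (fuel : Nat) (l cur : List Char) (acc : List (List Char)),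
    l.length < fuel → ('_' ∉ cur) → (∀ p ∈ acc, '_' ∉ p) →
    ∀ p ∈ PySem.Chars.splitOn.go ['_'] fuel l cur acc, '_' ∉ p := by
  intro fuel
  induction fuel with
  | zero => intro l cur acc h; omega
  | succ n ih =>
    intro l cur acc hlen hcur hacc
    cases l with
    | nil =>
      rw [PySem.Chars.splitOn.go.eq_def]
      simp only [List.mem_reverse, List.mem_cons]
      rintro p (rfl | hp)
      · simpa using hcur
      · exact hacc p hp
    | cons c rest =>
      rw [PySem.Chars.splitOn.go.eq_def]
      simp only []
      by_cases hc : c = '_'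
      · subst hc
        rw [if_pos (by simp [List.isPrefixOf])]
        refine ih _ [] _ ?_ (by simp) ?_
        · simp only [List.length_cons] at hlen; simpa using by omega
        · intro p hp
          rcases List.mem_cons.1 hp with rfl | hp'
          · simpa using hcur
          · exact hacc p hp'
      · rw [if_neg (by simp [List.isPrefixOf]; exact fun h => hc h.symm)]
        refine ih rest (c :: cur) acc ?_ ?_ hacc
        · simp only [List.length_cons] at hlen; omega
        · intro h
          rcases List.mem_cons.1 h with h' | h'
          · exact hc h'.symm
          · exact hcur h'

lemma pieces_free (s : List Char) : ∀ p ∈ PySem.Chars.splitOn s ['_'], '_' ∉ p := by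
  have h : PySem.Chars.splitOn s ['_'] = PySem.Chars.splitOn.go ['_'] (s.length + 1) s [] [] := rfl
  rw [h]
  exact go_free (s.length + 1) s [] [] (by omega) (by simp) (by simp)

lemma good_pyTokenize (name : String) : ∀ t ∈ pyTokenize name, GoodTok t := by
  intro t ht
  unfold pyTokenize at ht
  rw [List.mem_filter] at ht
  obtain ⟨ht1, ht2⟩ := ht
  constructor
  · simpa using ht2
  · have h : (PySem.Str.split? name "_").getD []
        = (PySem.Chars.splitOn name.toList ['_']).map String.ofList := by
      simp [PySem.Str.split?, PySem.Chars.split?]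
    rw [h, List.mem_map] at ht1
    obtain ⟨p, hp, rfl⟩ := ht1
    rw [String.toList_ofList]
    exact pieces_free name.toList p hp

-- "_".join is injective on nonempty lists of nonempty, '_'-free tokens
lemma join_inj {us vs : List String} (hu : ∀ s ∈ us, GoodTok s) (hv : ∀ s ∈ vs, GoodTok s)
    (hu0 : us ≠ []) (hv0 : vs ≠ []) (h : PySem.Str.join "_" us = PySem.Str.join "_" vs) :
    us = vs := by
  have h' := congrArg String.toList h
  rw [PySem.Str.toList_join, PySem.Str.toList_join] at h'
  have hj : ∀ (ws : List String), PySem.Chars.join "_".toList (ws.map String.toList)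
      = ['_'].intercalate (ws.map String.toList) := fun _ => rfl
  rw [hj, hj] at h'
  have e1 : List.splitOn '_' (['_'].intercalate (us.map String.toList)) = us.map String.toList :=
    List.splitOn_intercalate _ '_'
      (by intro l hl; rw [List.mem_map] at hl; obtain ⟨s, hs, rfl⟩ := hl; exact (hu s hs).2)
      (by simpa using hu0)
  have e2 : List.splitOn '_' (['_'].intercalate (vs.map String.toList)) = vs.map String.toList :=
    List.splitOn_intercalate _ '_'
      (by intro l hl; rw [List.mem_map] at hl; obtain ⟨s, hs, rfl⟩ := hl; exact (hv s hs).2)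
      (by simpa using hv0)
  have hmap : us.map String.toList = vs.map String.toList := by rw [← e1, ← e2, h']
  exact List.map_injective_iff.mpr (fun _ _ hh => String.toList_injective hh) hmap

lemma join_ne_empty (s : String) (rest : List String) (hs : s ≠ "") :
    PySem.Str.join "_" (s :: rest) ≠ "" := by
  intro h
  have h' := congrArg String.toList h
  rw [PySem.Str.toList_join] at h'
  cases rest with
  | nil =>
    simp only [List.map_cons, List.map_nil, PySem.Chars.join_singleton] at h'
    exact hs (by rw [← String.ofList_toList (s := s), h']; rfl)
  | cons b bs =>
    simp only [List.map_cons, PySem.Chars.join_cons_cons] at h'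
    simp at h'

-- the tokens_map dict comprehension: items = first-occurrence dedup, values a function of the key
lemma get?_foldl_insert_tok (l : List String) (d : PySem.Dict String (List String)) (k : String) :
    (l.foldl (fun d c => d.insert c (pyTokenize c)) d).get? k
      = if k ∈ l then some (pyTokenize k) else d.get? k := by
  induction l generalizing d with
  | nil => simp
  | cons a l ih =>
    simp only [List.foldl_cons, ih, List.mem_cons]
    by_cases hk : k ∈ l
    · simp [hk]
    · by_cases hka : k = a
      · subst hka; simp [hk, PySem.Dict.get?_insert_self]
      · simp [hk, hka, PySem.Dict.get?_insert_of_ne _ _ hka]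

lemma tokensMap_items (columns : List String) :
    (columns.foldl (fun d col => d.insert col (pyTokenize col)) PySem.Dict.empty).items
      = (PySem.List.dedup columns).map (fun c => (c, pyTokenize c)) := by
  have hkeys : (columns.foldl (fun d col => d.insert col (pyTokenize col)) PySem.Dict.empty).keys
      = PySem.List.dedup columns := by
    rw [PySem.Dict.keys_foldl_insert (f := fun _ c => pyTokenize c)]
    rfl
  have hnd : (columns.foldl (fun d col => d.insert col (pyTokenize col)) PySem.Dict.empty).keys.Nodup := by
    rw [hkeys]; exact PySem.List.nodup_dedup columns
  rw [PySem.Dict.items_eq_map_keys _ hnd [], hkeys]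
  apply List.map_congr_left
  intro c hc
  have hmem : c ∈ columns := (PySem.List.mem_dedup _ _).1 hc
  have h := get?_foldl_insert_tok columns PySem.Dict.empty c
  rw [if_pos hmem] at h
  simp [PySem.Dict.getD_eq_get?_getD, h]

lemma foldl_flatMap' {α β γ : Type} (g : γ → β → γ) (f : α → List β) (l : List α) (init : γ) :
    (l.flatMap f).foldl g init = l.foldl (fun acc a => (f a).foldl g acc) init := by
  induction l generalizing init with
  | nil => rfl
  | cons a l ih => simp [List.flatMap_cons, List.foldl_append, ih]

lemma count_map_str (l : List Int) (f : Int → String) (a : String) :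
    (l.map f).count a = l.countP (fun x => f x == a) := by
  simp [List.count, List.countP_map]; rfl

lemma sum_map_ite_nat (l : List String) (P : String → Bool) :
    (l.map (fun c => if P c then 1 else 0)).sum = l.countP P := by
  induction l with
  | nil => rfl
  | cons a l ih =>
    by_cases h : P a
    · simp [h, ih]; omega
    · simp [h, ih]


-- A's first pass builds exactly pcOf columns
lemma prefixCounts_eq (columns : List String) :
    ((columns.foldl (fun d col => d.insert col (pyTokenize col)) PySem.Dict.empty).items.foldl
      (fun pc ct =>
        if (ct.2.length : Int) < 3 then pc
        else (PySem.List.pyRange 2 (ct.2.length : Int) 1).foldl (fun pc len =>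
          pc.modify (PySem.Str.join "_" (PySem.List.slice ct.2 none (some len))) 0 (· + 1)) pc)
      PySem.Dict.empty)
    = pcOf columns := by
  rw [tokensMap_items, List.foldl_map]
  unfold pcOf
  rw [foldl_flatMap']
  apply PySem.List.foldl_congr_mem
  intro pc c _
  by_cases hlen : ((pyTokenize c).length : Int) < 3
  · rw [if_pos hlen]
    have h0 : PySem.List.pyRange 2 ((pyTokenize c).length : Int) 1 = [] :=
      PySem.List.pyRange_one_eq_nil (by omega)
    simp [prefixListOf, h0]
  · rw [if_neg hlen]
    unfold prefixListOf
    rw [List.foldl_map]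
    apply PySem.List.foldl_congr_mem
    intro acc len hmem
    rw [PySem.List.mem_pyRange_one] at hmem
    rw [PySem.List.slice_to _ (by omega)]
    rfl

lemma count_prefixListOf (u t : List String) (hu : ∀ s ∈ u, GoodTok s) (ht : ∀ s ∈ t, GoodTok s)
    (k : Nat) (hk2 : 2 ≤ k) (hkt : k < t.length) :
    (prefixListOf u).count (pfxOf t (k : Int))
      = if k < u.length ∧ u.take k = t.take k then 1 else 0 := by
  have hinj : ∀ len : Int, 2 ≤ len → len < (u.length : Int) →
      pfxOf u len = pfxOf t (k : Int) → len = (k : Int) ∧ u.take k = t.take k := by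
    intro len h2 hlt heq
    unfold pfxOf at heq
    have htake : u.take len.toNat = t.take (k : Int).toNat := by
      refine join_inj ?_ ?_ ?_ ?_ heq
      · exact fun s hs => hu s (List.mem_of_mem_take hs)
      · exact fun s hs => ht s (List.mem_of_mem_take hs)
      · have : (u.take len.toNat).length = len.toNat := by
          rw [List.length_take]; omega
        intro hnil; rw [hnil] at this; simp at this; omega
      · have : (t.take (k : Int).toNat).length = k := by
          rw [List.length_take]; simp; omega
        intro hnil; rw [hnil] at this; simp at this; omega
    have hlen : len.toNat = k := by
      have h1 := congrArg List.length htake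
      rw [List.length_take, List.length_take] at h1
      simp at h1; omega
    exact ⟨by omega, by simpa [hlen] using htake⟩
  unfold prefixListOf
  rw [count_map_str]
  by_cases hcase : k < u.length ∧ u.take k = t.take k
  · rw [if_pos hcase]
    have hcongr : ∀ len ∈ PySem.List.pyRange 2 (u.length : Int) 1,
        (pfxOf u len == pfxOf t (k : Int)) = (len == (k : Int)) := by
      intro len hmem
      rw [PySem.List.mem_pyRange_one] at hmem
      by_cases he : len = (k : Int)
      · have hpe : pfxOf u len = pfxOf t (k : Int) := by
          rw [he]
          unfold pfxOf
          congr 1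
          simpa using hcase.2
        rw [hpe, he]
        simp
      · have hne : pfxOf u len ≠ pfxOf t (k : Int) := fun hh =>
          he (hinj len hmem.1 hmem.2 hh).1
        simp [he, hne]
    rw [List.countP_congr (fun x hx => by rw [hcongr x hx])]
    have hcc : List.countP (fun x => x == (k : Int)) (PySem.List.pyRange 2 (u.length : Int) 1)
        = (PySem.List.pyRange 2 (u.length : Int) 1).count (k : Int) := rfl
    rw [hcc]
    refine List.count_eq_one_of_mem (PySem.List.nodup_pyRange_one _ _) ?_
    rw [PySem.List.mem_pyRange_one]
    exact ⟨by exact_mod_cast hk2, by exact_mod_cast hcase.1⟩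
  · rw [if_neg hcase]
    rw [List.countP_eq_zero.2]
    intro len hmem
    rw [PySem.List.mem_pyRange_one] at hmem
    simp only [beq_iff_eq]
    intro heq
    obtain ⟨he, hts⟩ := hinj len hmem.1 hmem.2 heq
    exact hcase ⟨by omega, hts⟩

-- the central counting fact: A's counter at a joined prefix equals B's pairwise count
lemma getD_pcOf (columns : List String) (t : List String) (ht : ∀ s ∈ t, GoodTok s)
    (k : Nat) (hk2 : 2 ≤ k) (hkt : k < t.length) :
    (pcOf columns).getD (pfxOf t (k : Int)) 0
      = (((PySem.List.dedup columns).map pyTokenize).countP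
          (fun u => decide ((k : Int) < (u.length : Int) ∧ u.take k = t.take k)) : Int) := by
  unfold pcOf
  rw [PySem.Dict.getD_foldl_modify_add_one]
  rw [List.count_flatMap]
  have hmap : ((PySem.List.dedup columns).map
        (List.count (pfxOf t (k : Int)) ∘ fun c => prefixListOf (pyTokenize c)))
      = ((PySem.List.dedup columns).map
        (fun c => if (fun c => decide (k < (pyTokenize c).length ∧ (pyTokenize c).take k = t.take k)) c then 1 else 0)) := by
    apply List.map_congr_left
    intro c _
    simp only [Function.comp_apply]
    rw [count_prefixListOf (pyTokenize c) t (good_pyTokenize c) ht k hk2 hkt]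
    by_cases h : k < (pyTokenize c).length ∧ (pyTokenize c).take k = t.take k
    · rw [if_pos h]; simp [h]
    · rw [if_neg h]; simp [h]
  rw [hmap, sum_map_ite_nat, List.countP_map]
  have : (fun u => decide ((k : Int) < (u.length : Int) ∧ u.take k = t.take k)) ∘ pyTokenize
      = fun c => decide (k < (pyTokenize c).length ∧ (pyTokenize c).take k = t.take k) := by
    funext c
    simp only [Function.comp_apply, Nat.cast_lt]
  rw [this]
  simp

-- A's "keep the last hit" fold is find? on the reversed range
lemma foldl_bestOpt (l : List Int) (p : Int → Bool) (f : Int → String) (b0 : Option String) :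
    l.foldl (fun b x => if p x then some (f x) else b) b0
      = match l.reverse.find? p with
        | some x => some (f x)
        | none => b0 := by
  induction l generalizing b0 with
  | nil => rfl
  | cons a l ih =>
    simp only [List.foldl_cons, List.reverse_cons, List.find?_append, ih]
    cases h : (l.reverse).find? p with
    | some x => simp
    | none =>
      simp only [Option.none_or, List.find?_cons, List.find?_nil]
      cases hp : p a <;> simp

-- B's "first hit wins" loop is find? on its list
lemma bestKeyB_go_eq (toks : List (List String)) (c : String) (t : List String) (l : List Int) :
    bestKeyB_go toks c t l
      = match l.find? (fun k =>
            decide (2 ≤ toks.countP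
              (fun u => decide (k < (u.length : Int) ∧ u.take k.toNat = t.take k.toNat)))) with
        | some k => PySem.Str.join "_" (t.take k.toNat)
        | none => c := by
  induction l with
  | nil => rfl
  | cons a l ih =>
    rw [bestKeyB_go]
    by_cases h : 2 ≤ toks.countP
        (fun u => decide (a < (u.length : Int) ∧ u.take a.toNat = t.take a.toNat))
    · rw [if_pos h]
      simp only [List.find?_cons, decide_eq_true h]
    · rw [if_neg h, ih]
      simp only [List.find?_cons, decide_eq_false h]

lemma find?_congr_mem {α : Type} (l : List α) (p q : α → Bool) (h : ∀ x ∈ l, p x = q x) :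
    l.find? p = l.find? q := by
  induction l with
  | nil => rfl
  | cons a l ih =>
    simp only [List.find?_cons]
    rw [h a (by simp)]
    cases q a <;> simp [ih (fun x hx => h x (by simp [hx]))]

-- ===== VERDICT (by name: the statement is the Claim_ definition above) =====
lemma pfx_ne_empty (t : List String) (hG : ∀ s ∈ t, GoodTok s) (x : Int)
    (h2 : 2 ≤ x) (hx : x < (t.length : Int)) : pfxOf t x ≠ "" := by
  cases t with
  | nil => simp at hx; omega
  | cons s rest =>
    obtain ⟨m, hm⟩ : ∃ m : Nat, x.toNat = m + 1 := ⟨x.toNat - 1, by omega⟩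
    unfold pfxOf
    rw [hm, List.take_succ_cons]
    exact join_ne_empty s _ ((hG s (by simp)).1)

lemma step_eq (columns : List String) (g : PySem.Dict String (List String)) (c : String) :
    (match
      (if 3 ≤ ((pyTokenize c).length : Int) then
        (PySem.List.pyRange 2 ((pyTokenize c).length : Int) 1).foldl (fun best len =>
          if 2 ≤ (pcOf columns).getD (PySem.Str.join "_" (PySem.List.slice (pyTokenize c) none (some len))) 0
          then some (PySem.Str.join "_" (PySem.List.slice (pyTokenize c) none (some len))) else best) none
      else none) with
    | some p => if p != "" then g.modify p [] (· ++ [c]) else g.modify c [] (· ++ [c])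
    | none => g.modify c [] (· ++ [c]))
    = g.modify
        (bestKeyB_go ((PySem.List.dedup columns).map pyTokenize) c (pyTokenize c)
          (PySem.List.pyRange (((pyTokenize c).length : Int) - 1) 1 (-1))) [] (· ++ [c]) := by
  set t := pyTokenize c with ht
  set toks := (PySem.List.dedup columns).map pyTokenize with htoks
  by_cases h3 : 3 ≤ ((t.length : Int))
  · rw [if_pos h3]
    -- A's inner fold, with slices rewritten to takes
    have hsl : (PySem.List.pyRange 2 (t.length : Int) 1).foldl (fun best len =>
          if 2 ≤ (pcOf columns).getD (PySem.Str.join "_" (PySem.List.slice t none (some len))) 0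
          then some (PySem.Str.join "_" (PySem.List.slice t none (some len))) else best) none
        = (PySem.List.pyRange 2 (t.length : Int) 1).foldl (fun best len =>
          if decide (2 ≤ (pcOf columns).getD (pfxOf t len) 0) then some (pfxOf t len) else best) none := by
      apply PySem.List.foldl_congr_mem
      intro b len hmem
      rw [PySem.List.mem_pyRange_one] at hmem
      rw [PySem.List.slice_to _ (by omega)]
      simp [pfxOf]
    rw [hsl, foldl_bestOpt]
    have harr : PySem.List.pyRange ((t.length : Int) - 1) 1 (-1)
        = (PySem.List.pyRange 2 (t.length : Int) 1).reverse := by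
      rw [PySem.List.pyRange_neg_one_eq_reverse]
      norm_num
    rw [harr, bestKeyB_go_eq]
    have hfc : (PySem.List.pyRange 2 (t.length : Int) 1).reverse.find? (fun k =>
          decide (2 ≤ toks.countP
            (fun u => decide (k < (u.length : Int) ∧ u.take k.toNat = t.take k.toNat))))
        = (PySem.List.pyRange 2 (t.length : Int) 1).reverse.find?
            (fun len => decide (2 ≤ (pcOf columns).getD (pfxOf t len) 0)) := by
      apply find?_congr_mem
      intro x hx
      rw [List.mem_reverse, PySem.List.mem_pyRange_one] at hx
      obtain ⟨m, rfl⟩ : ∃ m : Nat, x = (m : Int) := ⟨x.toNat, (Int.toNat_of_nonneg (by omega)).symm⟩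
      have hm2 : 2 ≤ m := by exact_mod_cast hx.1
      have hmt : m < t.length := by exact_mod_cast hx.2
      rw [getD_pcOf columns t (good_pyTokenize c) m hm2 hmt]
      simp only [Int.toNat_natCast]
      rw [decide_eq_decide]
      exact ⟨fun h => by exact_mod_cast h, fun h => by exact_mod_cast h⟩
    rw [hfc]
    cases hfind : (PySem.List.pyRange 2 (t.length : Int) 1).reverse.find?
        (fun len => decide (2 ≤ (pcOf columns).getD (pfxOf t len) 0)) with
    | none => rfl
    | some x =>
      have hxmem : x ∈ (PySem.List.pyRange 2 (t.length : Int) 1).reverse :=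
        List.mem_of_find?_eq_some hfind
      rw [List.mem_reverse, PySem.List.mem_pyRange_one] at hxmem
      have hne : pfxOf t x ≠ "" :=
        pfx_ne_empty t (by rw [ht]; exact good_pyTokenize c) x hxmem.1 hxmem.2
      simp only []
      rw [if_pos (by simpa using hne)]
      rfl
  · rw [if_neg h3]
    have h0 : PySem.List.pyRange ((t.length : Int) - 1) 1 (-1) = [] :=
      PySem.List.pyRange_neg_one_eq_nil (by omega)
    rw [h0]
    rfl

theorem group_columns_spec : Claim_equal_group_columns := by
  intro columns _
  show group_columns columns = group_columns_alt columns
  dsimp only [group_columns, group_columns_alt]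
  rw [prefixCounts_eq, tokensMap_items]
  have hzip : (PySem.List.dedup columns).zip ((PySem.List.dedup columns).map pyTokenize)
      = (PySem.List.dedup columns).map (fun c => (c, pyTokenize c)) := by
    have h := List.zip_map' (f := id) (g := pyTokenize) (l := PySem.List.dedup columns)
    simpa using h
  rw [hzip]
  congr 1
  rw [List.foldl_map, List.foldl_map]
  apply PySem.List.foldl_congr_mem
  intro g c _
  exact step_eq columns g c
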